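-- pv_equiv track=rewrite | github.com/akeenantexasfcs/L1B15 | L1 - Backtesting and Optimization Tool.py | has_adjacent_intervals_in_list
-- ===== SOURCE A (Python) =====
-- INTERVAL_ORDER_11 = ['Jan-Feb', 'Feb-Mar', 'Mar-Apr', 'Apr-May', 'May-Jun',
--                      'Jun-Jul', 'Jul-Aug', 'Aug-Sep', 'Sep-Oct', 'Oct-Nov', 'Nov-Dec']
--
-- def is_adjacent(interval1, interval2):
--     """Check if two intervals are adjacent, with wrap-around"""
--     try:
--         idx1 = INTERVAL_ORDER_11.index(interval1)
--         idx2 = INTERVAL_ORDER_11.index(interval2)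
--     except ValueError:
--         return False # Interval not in list
--
--     diff = abs(idx1 - idx2)
--     # Check for direct adjacency (diff == 1) or wrap-around (diff == 10)
--     return diff == 1 or diff == (len(INTERVAL_ORDER_11) - 1)
--
-- def has_adjacent_intervals_in_list(intervals_list):
--     """Check if any intervals in the list are adjacent (excluding Nov-Dec/Jan-Feb wrap)"""
--     for i in range(len(intervals_list)):
--         for j in range(i+1, len(intervals_list)):
--             interval1 = intervals_list[i]
--             interval2 = intervals_list[j]
--
--             # Check if they're adjacent
--             if is_adjacent(interval1, interval2):
--                 # Allow Nov-Dec and Jan-Feb together (wrap-around exception)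
--                 if (interval1 == 'Nov-Dec' and interval2 == 'Jan-Feb') or \
--                    (interval1 == 'Jan-Feb' and interval2 == 'Nov-Dec'):
--                     continue  # This is allowed
--                 else:
--                     return True  # Adjacent intervals found - not allowed
--     return False  # No adjacent intervals found
-- ===== SOURCE B (Python) =====
-- INTERVAL_ORDER_11 = ['Jan-Feb', 'Feb-Mar', 'Mar-Apr', 'Apr-May', 'May-Jun',
--                      'Jun-Jul', 'Jul-Aug', 'Aug-Sep', 'Sep-Oct', 'Oct-Nov', 'Nov-Dec']
--
-- def has_adjacent_intervals_in_list(intervals_list):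
--     """O(n): map intervals to indices, collect the present indices in a set,
--     and look for a consecutive pair (k, k+1).  The wrap pair (Nov-Dec, Jan-Feb)
--     has index distance 10, never 1, so it is excluded automatically."""
--     order = {name: k for k, name in enumerate(INTERVAL_ORDER_11)}
--     present = {order[x] for x in intervals_list if x in order}
--     return any(k + 1 in present for k in present)
-- ===== Notes on version B (the rewrite author's own statement) =====
-- stated objective: faster
-- what changed: Replaced the O(n^2) all-pairs scan (each pair doing two linear list.index searches) with a single pass that maps each interval to its index via a dict and collects a set of present indices, then checks for a consecutive index pair (k, k+1); the wrap pair is excluded automatically since its index distance is 10.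
import Mathlib
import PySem

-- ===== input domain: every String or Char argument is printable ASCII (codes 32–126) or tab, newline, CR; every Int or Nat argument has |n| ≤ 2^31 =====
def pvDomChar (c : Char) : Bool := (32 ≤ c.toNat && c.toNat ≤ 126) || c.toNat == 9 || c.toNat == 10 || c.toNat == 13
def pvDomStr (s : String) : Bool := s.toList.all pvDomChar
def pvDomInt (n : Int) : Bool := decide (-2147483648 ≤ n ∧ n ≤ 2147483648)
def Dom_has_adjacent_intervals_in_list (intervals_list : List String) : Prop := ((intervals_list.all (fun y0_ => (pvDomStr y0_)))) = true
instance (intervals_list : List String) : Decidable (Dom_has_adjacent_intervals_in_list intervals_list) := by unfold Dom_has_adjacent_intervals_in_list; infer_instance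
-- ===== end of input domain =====

-- B replaces A's O(n^2) all-pairs scan by one pass building a set of interval indices and checking for a consecutive pair.

-- ===== PORT A =====
def INTERVAL_ORDER_11 : List String := ["Jan-Feb", "Feb-Mar", "Mar-Apr", "Apr-May", "May-Jun",
  "Jun-Jul", "Jul-Aug", "Aug-Sep", "Sep-Oct", "Oct-Nov", "Nov-Dec"]

def is_adjacent (interval1 interval2 : String) : Bool :=
  match PySem.List.index? INTERVAL_ORDER_11 interval1, PySem.List.index? INTERVAL_ORDER_11 interval2 with
  | some idx1, some idx2 =>
      let diff := ((idx1 : Int) - (idx2 : Int)).natAbs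
      diff == 1 || diff == (INTERVAL_ORDER_11.length - 1)
  | _, _ => false  -- the ValueError branch: interval not in list

-- the pair (i, j>i) loop: outer element against every later element, then recurse
def pvALoop : List String → Bool
  | [] => false
  | interval1 :: rest =>
      (rest.any (fun interval2 =>
        is_adjacent interval1 interval2 &&
        !((interval1 == "Nov-Dec" && interval2 == "Jan-Feb") ||
          (interval1 == "Jan-Feb" && interval2 == "Nov-Dec")))) || pvALoop rest

def has_adjacent_intervals_in_list (intervals_list : List String) : Bool :=
  pvALoop intervals_list

-- ===== PORT B =====
def pvOrder : PySem.Dict String Int :=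
  (PySem.List.enumerate INTERVAL_ORDER_11 0).foldl (fun d p => d.insert p.2 p.1) PySem.Dict.empty

def has_adjacent_intervals_in_list_alt (intervals_list : List String) : Bool :=
  let order := pvOrder
  let present : PySem.Set Int :=
    intervals_list.foldl (fun s x =>
      match order.get? x with
      | some k => PySem.Set.add s k
      | none => s) PySem.Set.empty
  present.any (fun k => PySem.Set.contains present (k + 1))

-- ===== PRECONDITION & SPEC =====
def Spec_has_adjacent_intervals_in_list (intervals_list : List String) (out : Bool) : Prop := out = has_adjacent_intervals_in_list_alt intervals_list
instance (intervals_list : List String) (out : Bool) : Decidable (Spec_has_adjacent_intervals_in_list intervals_list out) := by unfold Spec_has_adjacent_intervals_in_list; infer_instance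

-- ===== CLAIM (what is proved, stated in full; the proofs are below) =====
def Claim_equal_has_adjacent_intervals_in_list : Prop := ∀ (intervals_list : List String), Dom_has_adjacent_intervals_in_list intervals_list → Spec_has_adjacent_intervals_in_list intervals_list (has_adjacent_intervals_in_list intervals_list)

-- ===== LEMMAS AND PROOFS =====

-- A's inner-loop condition, named for the proofs
def pvGood (x y : String) : Bool :=
  is_adjacent x y &&
  !((x == "Nov-Dec" && y == "Jan-Feb") || (x == "Jan-Feb" && y == "Nov-Dec"))

-- the dict lookup agrees with list.index
lemma pvOrder_get?_eq (x : String) :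
    pvOrder.get? x = (PySem.List.index? INTERVAL_ORDER_11 x).map (fun n => (n : Int)) := by
  by_cases h0 : x = "Jan-Feb"; · subst h0; decide
  by_cases h1 : x = "Feb-Mar"; · subst h1; decide
  by_cases h2 : x = "Mar-Apr"; · subst h2; decide
  by_cases h3 : x = "Apr-May"; · subst h3; decide
  by_cases h4 : x = "May-Jun"; · subst h4; decide
  by_cases h5 : x = "Jun-Jul"; · subst h5; decide
  by_cases h6 : x = "Jul-Aug"; · subst h6; decide
  by_cases h7 : x = "Aug-Sep"; · subst h7; decide
  by_cases h8 : x = "Sep-Oct"; · subst h8; decide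
  by_cases h9 : x = "Oct-Nov"; · subst h9; decide
  by_cases h10 : x = "Nov-Dec"; · subst h10; decide
  have hmem : x ∉ INTERVAL_ORDER_11 := by
    simp [INTERVAL_ORDER_11]
    tauto
  rw [(PySem.List.index?_eq_none_iff _ _).mpr hmem]
  have hk : x ∉ pvOrder.keys := by
    have : pvOrder.keys = INTERVAL_ORDER_11 := by decide
    rw [this]; exact hmem
  simp [(PySem.Dict.get?_eq_none_iff_not_mem_keys _ _).mpr hk]

-- per-pair characterisation: A's inner condition holds iff the two indices are consecutive
lemma pvGood_iff (x y : String) :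
    pvGood x y = true ↔
      ((∃ k, pvOrder.get? x = some k ∧ pvOrder.get? y = some (k + 1)) ∨
       (∃ k, pvOrder.get? y = some k ∧ pvOrder.get? x = some (k + 1))) := by
  rw [pvOrder_get?_eq x, pvOrder_get?_eq y]
  unfold pvGood is_adjacent
  cases hx : PySem.List.index? INTERVAL_ORDER_11 x with
  | none => simp
  | some a =>
    cases hy : PySem.List.index? INTERVAL_ORDER_11 y with
    | none => simp
    | some b =>
      obtain ⟨ha, hxa, -⟩ := PySem.List.getElem_of_index?_eq_some hx
      obtain ⟨hb, hyb, -⟩ := PySem.List.getElem_of_index?_eq_some hy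
      have ha' : a < 11 := by simpa [INTERVAL_ORDER_11] using ha
      have hb' : b < 11 := by simpa [INTERVAL_ORDER_11] using hb
      subst hxa; subst hyb
      interval_cases a <;> interval_cases b <;> simp [INTERVAL_ORDER_11]

lemma pvGood_symm (x y : String) : pvGood x y = pvGood y x := by
  rw [Bool.eq_iff_iff, pvGood_iff, pvGood_iff]; exact or_comm

lemma pvGood_self (x : String) : pvGood x x = false := by
  rw [← Bool.not_eq_true, pvGood_iff]
  rintro (⟨k, h1, h2⟩ | ⟨k, h1, h2⟩) <;> rw [h1] at h2 <;> simp at h2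

-- A returns true iff some pair of listed intervals satisfies pvGood
lemma pvALoop_iff (xs : List String) :
    pvALoop xs = true ↔ ∃ x ∈ xs, ∃ y ∈ xs, pvGood x y = true := by
  induction xs with
  | nil => simp [pvALoop]
  | cons x rest ih =>
    show (rest.any (fun y => pvGood x y) || pvALoop rest) = true ↔ _
    rw [Bool.or_eq_true, List.any_eq_true, ih]
    constructor
    · rintro (⟨y, hy, hg⟩ | ⟨a, ha, b, hb, hg⟩)
      · exact ⟨x, List.mem_cons_self, y, List.mem_cons_of_mem _ hy, hg⟩
      · exact ⟨a, List.mem_cons_of_mem _ ha, b, List.mem_cons_of_mem _ hb, hg⟩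
    · rintro ⟨a, ha, b, hb, hg⟩
      rcases List.mem_cons.mp ha with h1 | h1
      · rcases List.mem_cons.mp hb with h2 | h2
        · subst h1; subst h2; rw [pvGood_self] at hg; exact absurd hg (by simp)
        · subst h1; exact Or.inl ⟨b, h2, hg⟩
      · rcases List.mem_cons.mp hb with h2 | h2
        · subst h2; exact Or.inl ⟨a, h1, by rw [pvGood_symm]; exact hg⟩
        · exact Or.inr ⟨a, h1, b, h2, hg⟩

-- membership in B's set of present indices
lemma pvPresent_mem (xs : List String) (s : PySem.Set Int) (k : Int) :
    k ∈ xs.foldl (fun s x =>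
        match pvOrder.get? x with
        | some k => PySem.Set.add s k
        | none => s) s ↔ k ∈ s ∨ ∃ x ∈ xs, pvOrder.get? x = some k := by
  induction xs generalizing s with
  | nil => simp
  | cons x rest ih =>
    simp only [List.foldl_cons, ih]
    cases h : pvOrder.get? x with
    | none => simp [h]
    | some v =>
      rw [PySem.Set.mem_add]
      constructor
      · rintro ((hs | rfl) | hr)
        · exact Or.inl hs
        · exact Or.inr ⟨x, by simp, h⟩
        · obtain ⟨z, hz, hzk⟩ := hr; exact Or.inr ⟨z, by simp [hz], hzk⟩
      · rintro (hs | ⟨z, hz, hzk⟩)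
        · exact Or.inl (Or.inl hs)
        · rcases List.mem_cons.mp hz with rfl | hz
          · rw [h] at hzk; exact Or.inl (Or.inr (Option.some.inj hzk).symm)
          · exact Or.inr ⟨z, hz, hzk⟩

lemma pvAlt_iff (xs : List String) :
    has_adjacent_intervals_in_list_alt xs = true ↔
      ∃ k : Int, (∃ x ∈ xs, pvOrder.get? x = some k) ∧ ∃ y ∈ xs, pvOrder.get? y = some (k + 1) := by
  unfold has_adjacent_intervals_in_list_alt
  rw [List.any_eq_true]
  constructor
  · rintro ⟨k, hk, hc⟩
    rw [PySem.Set.contains_iff] at hc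
    rw [pvPresent_mem] at hk hc
    simp only [PySem.Set.empty, List.not_mem_nil, false_or] at hk hc
    exact ⟨k, hk, hc⟩
  · rintro ⟨k, hk, hk1⟩
    refine ⟨k, ?_, ?_⟩
    · rw [pvPresent_mem]; exact Or.inr hk
    · rw [PySem.Set.contains_iff, pvPresent_mem]; exact Or.inr hk1

-- ===== VERDICT (by name: the statement is the Claim_ definition above) =====
theorem has_adjacent_intervals_in_list_spec : Claim_equal_has_adjacent_intervals_in_list := by
  intro xs _
  show has_adjacent_intervals_in_list xs = has_adjacent_intervals_in_list_alt xs
  rw [Bool.eq_iff_iff]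
  unfold has_adjacent_intervals_in_list
  rw [pvALoop_iff, pvAlt_iff]
  constructor
  · rintro ⟨x, hx, y, hy, hg⟩
    rcases (pvGood_iff x y).mp hg with ⟨k, h1, h2⟩ | ⟨k, h1, h2⟩
    · exact ⟨k, ⟨x, hx, h1⟩, ⟨y, hy, h2⟩⟩
    · exact ⟨k, ⟨y, hy, h1⟩, ⟨x, hx, h2⟩⟩
  · rintro ⟨k, ⟨x, hx, h1⟩, ⟨y, hy, h2⟩⟩
    exact ⟨x, hx, y, hy, (pvGood_iff x y).mpr (Or.inl ⟨k, h1, h2⟩)⟩
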